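-- pv_equiv track=rewrite | github.com/Perfectz/web-search-framework-experiment | apartment_agent/mailer.py | _format_env_value
-- ===== SOURCE A (Python) =====
-- def _format_env_value(value: str) -> str:
--     text = str(value)
--     if text == "":
--         return ""
--     if any(character in text for character in [' ', '#', '"', "'", '=']):
--         escaped = text.replace("\\", "\\\\").replace('"', '\\"')
--         return f'"{escaped}"'
--     return text
-- ===== SOURCE B (Python) =====
-- _SPECIALS = {' ', '#', '"', "'", '='}
--
--
-- def _format_env_value(value: str) -> str:
--     text = str(value)
--     if text == "":
--         return ""
--     out = []
--     needs_quote = False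
--     for ch in text:
--         if ch == '\\':
--             out.append('\\\\')
--         elif ch == '"':
--             out.append('\\"')
--         else:
--             out.append(ch)
--         if ch in _SPECIALS:
--             needs_quote = True
--     if needs_quote:
--         return '"' + ''.join(out) + '"'
--     return text
-- ===== Notes on version B (the rewrite author's own statement) =====
-- stated objective: alternative
-- what changed: Replaces the membership scan plus two chained str.replace passes with a single explicit pass over the characters that simultaneously builds the escaped text and decides whether quoting is needed.
import Mathlib
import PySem

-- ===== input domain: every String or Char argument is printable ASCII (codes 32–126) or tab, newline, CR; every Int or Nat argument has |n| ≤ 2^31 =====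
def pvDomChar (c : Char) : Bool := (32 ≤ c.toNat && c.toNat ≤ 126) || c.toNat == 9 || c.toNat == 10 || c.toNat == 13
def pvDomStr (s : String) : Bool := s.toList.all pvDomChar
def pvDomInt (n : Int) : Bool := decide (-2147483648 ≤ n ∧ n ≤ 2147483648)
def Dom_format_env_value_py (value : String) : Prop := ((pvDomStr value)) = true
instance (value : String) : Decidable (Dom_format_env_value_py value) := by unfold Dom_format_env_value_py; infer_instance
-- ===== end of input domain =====

-- B replaces the membership scan plus two chained replace passes of A with a single
-- explicit pass that builds the escaped text and the needs-quote flag together (alternative).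


-- ===== PORT A =====
def format_env_value_py (value : String) : String :=
  let text := value
  if text = "" then ""
  else if ([" ", "#", "\"", "'", "="].any (fun character => PySem.Str.isIn character text)) then
    let escaped := PySem.Str.replace (PySem.Str.replace text "\\" "\\\\") "\"" "\\\""
    "\"" ++ escaped ++ "\""
  else text

-- ===== PORT B =====
def pvSpecials : List Char := [' ', '#', '"', '\'', '=']

def pvStep (st : List Char × Bool) (ch : Char) : List Char × Bool :=
  (st.1 ++ (if ch = '\\' then ['\\', '\\'] else if ch = '"' then ['\\', '"'] else [ch]),
   st.2 || pvSpecials.contains ch)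

def format_env_value_py_alt (value : String) : String :=
  let text := value
  if text = "" then ""
  else
    let st := text.toList.foldl pvStep ([], false)
    if st.2 then "\"" ++ String.ofList st.1 ++ "\"" else text

-- ===== PRECONDITION & SPEC =====
def Spec_format_env_value_py (value : String) (out : String) : Prop := out = format_env_value_py_alt value
instance (value : String) (out : String) : Decidable (Spec_format_env_value_py value out) := by unfold Spec_format_env_value_py; infer_instance

-- ===== CLAIM (what is proved, stated in full; the proofs are below) =====
def Claim_equal_format_env_value_py : Prop := ∀ (value : String), Dom_format_env_value_py value → Spec_format_env_value_py value (format_env_value_py value)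

-- ===== LEMMAS AND PROOFS =====

def pvEsc (ch : Char) : List Char :=
  if ch = '\\' then ['\\', '\\'] else if ch = '"' then ['\\', '"'] else [ch]

-- single-character replace is per-character substitution
theorem pv_go_single (q : Char) (new : List Char) :
    ∀ (l acc : List Char) (fuel : Nat), l.length ≤ fuel →
      PySem.Chars.replace.go [q] new fuel l acc
        = acc.reverse ++ l.flatMap (fun c => if c = q then new else [c]) := by
  intro l
  induction l with
  | nil =>
      intro acc fuel _
      cases fuel <;> simp [PySem.Chars.replace.go]
  | cons c t ih =>
      intro acc fuel hf
      cases fuel with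
      | zero => simp at hf
      | succ fuel =>
        have hf' : t.length ≤ fuel := by simpa using hf
        by_cases hc : c = q
        · subst hc
          have hpre : List.isPrefixOf [c] (c :: t) = true := by
            simp [List.isPrefixOf]
          simp only [PySem.Chars.replace.go, hpre, if_pos]
          rw [show List.drop [c].length (c :: t) = t from rfl]
          rw [ih (new.reverse ++ acc) fuel hf']
          simp
        · have hpre : List.isPrefixOf [q] (c :: t) = false := by
            simp [List.isPrefixOf]
            intro h; exact hc (h.symm)
          simp only [PySem.Chars.replace.go, hpre]
          rw [if_neg (by simp)]
          rw [ih (c :: acc) fuel hf']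
          simp [hc]

theorem pv_replace_single (q : Char) (new : List Char) (l : List Char) :
    PySem.Chars.replace l [q] new = l.flatMap (fun c => if c = q then new else [c]) := by
  rw [PySem.Chars.replace, if_neg (by simp)]
  exact pv_go_single q new l [] l.length (le_refl _)

theorem pv_chained_replace (l : List Char) :
    PySem.Chars.replace (PySem.Chars.replace l ['\\'] ['\\', '\\']) ['"'] ['\\', '"']
      = l.flatMap pvEsc := by
  rw [pv_replace_single, pv_replace_single, List.flatMap_assoc]
  have hf : (fun c => (if c = '\\' then ['\\', '\\'] else [c]).flatMap
      (fun d => if d = '"' then ['\\', '"'] else [d])) = pvEsc := by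
    funext c
    by_cases h1 : c = '\\'
    · subst h1; simp [pvEsc]
    · by_cases h2 : c = '"'
      · subst h2; simp [pvEsc]
      · simp [pvEsc, h1, h2]
  rw [hf]

theorem pv_foldl_step (l : List Char) (acc : List Char) (b : Bool) :
    l.foldl pvStep (acc, b) = (acc ++ l.flatMap pvEsc, b || l.any (fun c => pvSpecials.contains c)) := by
  induction l generalizing acc b with
  | nil => simp
  | cons c t ih =>
      simp only [List.foldl_cons, pvStep, List.flatMap_cons, List.any_cons]
      rw [ih]
      simp [pvEsc, Bool.or_assoc, List.append_assoc]

theorem pv_isIn_single (c : Char) (s : List Char) :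
    PySem.Chars.isIn [c] s = decide (c ∈ s) := by
  by_cases h : c ∈ s
  · rw [decide_eq_true h]
    rw [PySem.Chars.isIn_iff_infix]
    obtain ⟨u, v, huv⟩ := List.append_of_mem h
    exact ⟨u, v, by simp [huv]⟩
  · rw [decide_eq_false h]
    rw [PySem.Chars.isIn_eq_false_iff]
    intro hinf
    exact h (List.singleton_sublist.mp hinf.sublist)

theorem pv_cond_eq (s : List Char) :
    ([" ", "#", "\"", "'", "="].any (fun character => PySem.Chars.isIn character.toList s))
      = s.any (fun c => pvSpecials.contains c) := by
  have h1 : (" " : String).toList = [' '] := rfl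
  have h2 : ("#" : String).toList = ['#'] := rfl
  have h3 : ("\"" : String).toList = ['"'] := rfl
  have h4 : ("'" : String).toList = ['\''] := rfl
  have h5 : ("=" : String).toList = ['='] := rfl
  simp only [List.any_cons, List.any_nil, h1, h2, h3, h4, h5, pv_isIn_single, Bool.or_false]
  rcases Bool.eq_false_or_eq_true (s.any (fun c => pvSpecials.contains c)) with h | h <;>
    rw [h] <;> [skip; skip] <;> first
      | (simp only [List.any_eq_false] at h ⊢
         simp only [Bool.or_eq_false_iff, decide_eq_false_iff_not]
         refine ⟨fun hm => ?_, fun hm => ?_, fun hm => ?_, fun hm => ?_, fun hm => ?_⟩ <;>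
           · have := h _ hm; simp [pvSpecials] at this)
      | (simp only [List.any_eq_true] at h
         obtain ⟨c, hc, hmem⟩ := h
         simp [pvSpecials] at hmem
         rcases hmem with h' | h' | h' | h' | h' <;> subst h' <;> simp [hc])

theorem pv_str_eq_of_toList {a b : String} (h : a.toList = b.toList) : a = b := by
  have h1 : String.ofList a.toList = String.ofList b.toList := congrArg _ h
  simpa using h1

-- ===== VERDICT (by name: the statement is the Claim_ definition above) =====
theorem format_env_value_py_spec : Claim_equal_format_env_value_py := by
  intro value _
  unfold Spec_format_env_value_py format_env_value_py format_env_value_py_alt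
  by_cases h0 : value = ""
  · simp [h0]
  · simp only [h0, if_false]
    rw [pv_foldl_step]
    have hcond : ([" ", "#", "\"", "'", "="].any (fun character => PySem.Str.isIn character value))
        = value.toList.any (fun c => pvSpecials.contains c) := by
      simp only [PySem.Str.isIn_eq]
      exact pv_cond_eq value.toList
    rw [hcond]
    simp only [Bool.false_or, List.nil_append]
    cases h : value.toList.any (fun c => pvSpecials.contains c) with
    | false => simp only [Bool.false_eq_true, if_false]
    | true =>
      simp only [if_true]
      have hrep : (PySem.Str.replace (PySem.Str.replace value "\\" "\\\\") "\"" "\\\"").toList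
          = value.toList.flatMap pvEsc := by
        rw [PySem.Str.toList_replace, PySem.Str.toList_replace]
        exact pv_chained_replace value.toList
      apply pv_str_eq_of_toList
      simp only [String.toList_append, hrep]
      simp
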